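-- pv_equiv track=rewrite | github.com/power080900/coding_prac | LV1/Flexible_work_system.py | solution
-- ===== SOURCE A (Python) =====
-- def solution(schedule, timelog, startday):
--     answer = 0
--     for i, time in enumerate(schedule):
--         time_hh = time // 100
--         time_mm = time % 100
--         check_time = time + 10
--         if time_mm + 10 >= 60:
--             check_time = (time_hh + 1) * 100 + (time_mm + 10) % 60
--         check = 0
--         for j in range(7):
--             time_log = timelog[i][j]
--             if (j+startday)%7 not in [6,0] and time_log <= check_time:
--                 check += 1
--         if check == 5:
--             answer += 1
--     return answer
-- ===== SOURCE B (Python) =====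
-- def solution(schedule, timelog, startday):
--     # Different decomposition: instead of looping employee-by-employee and
--     # counting on-time weekdays up to 5, precompute all deadlines in a staged
--     # pass, then iterate DAYS in the outer loop, each weekday pass filtering
--     # the surviving employees (7 consecutive days hold exactly 5 weekdays,
--     # so A's count == 5 means surviving every weekday pass).
--     minutes = [t // 100 * 60 + t % 100 + 10 for t in schedule]
--     deadlines = [m // 60 * 100 + m % 60 for m in minutes]
--     survivors = list(range(len(schedule)))
--     for j in range(7):
--         if (j + startday) % 7 not in (0, 6):
--             survivors = [i for i in survivors if timelog[i][j] <= deadlines[i]]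
--     return len(survivors)
-- ===== Notes on version B (the rewrite author's own statement) =====
-- stated objective: alternative
-- what changed: B inverts the loop nesting: deadlines are precomputed in staged passes (minutes conversion instead of A's carry branch), then the outer loop runs over the 7 days, each weekday pass filtering a maintained survivor list of employee indices; the answer is the number of survivors, replacing A's per-employee on-time counter compared with 5.
import Mathlib
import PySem

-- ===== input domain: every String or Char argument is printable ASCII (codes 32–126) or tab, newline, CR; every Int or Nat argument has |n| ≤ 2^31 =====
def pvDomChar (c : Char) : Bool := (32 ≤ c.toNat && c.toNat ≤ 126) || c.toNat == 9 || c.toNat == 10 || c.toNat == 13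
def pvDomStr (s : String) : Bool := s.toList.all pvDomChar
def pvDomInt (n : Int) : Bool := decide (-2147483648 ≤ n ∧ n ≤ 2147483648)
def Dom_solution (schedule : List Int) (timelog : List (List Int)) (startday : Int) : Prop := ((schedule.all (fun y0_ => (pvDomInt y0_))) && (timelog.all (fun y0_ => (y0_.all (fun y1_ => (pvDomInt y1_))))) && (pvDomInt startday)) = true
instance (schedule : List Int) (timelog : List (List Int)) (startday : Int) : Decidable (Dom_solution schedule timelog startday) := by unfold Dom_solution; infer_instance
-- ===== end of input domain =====

-- B inverts the loop nesting: deadlines are precomputed in staged passes, then the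
-- outer loop runs over the 7 days, each weekday pass filtering a survivor list of
-- employee indices; the answer is the survivor count (objective: alternative).

-- ===== PORT A =====
def solution (schedule : List Int) (timelog : List (List Int)) (startday : Int) : Int :=
  (PySem.List.enumerate schedule).foldl (fun answer p =>
    let i := p.1
    let time := p.2
    let time_hh := PySem.Int.floordiv time 100
    let time_mm := PySem.Int.mod time 100
    let check_time := if time_mm + 10 ≥ 60
      then (time_hh + 1) * 100 + PySem.Int.mod (time_mm + 10) 60
      else time + 10
    let check := (PySem.List.pyRange 0 7 1).foldl (fun check j =>
      let time_log := PySem.List.pyGetD (PySem.List.pyGetD timelog i []) j 0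
      if ¬ (PySem.Int.mod (j + startday) 7 ∈ ([6, 0] : List Int)) ∧ time_log ≤ check_time
        then check + 1 else check) (0 : Int)
    if check = 5 then answer + 1 else answer) 0

-- ===== PORT B =====
def solution_alt (schedule : List Int) (timelog : List (List Int)) (startday : Int) : Int :=
  let minutes := schedule.map (fun t =>
    PySem.Int.floordiv t 100 * 60 + PySem.Int.mod t 100 + 10)
  let deadlines := minutes.map (fun m =>
    PySem.Int.floordiv m 60 * 100 + PySem.Int.mod m 60)
  let survivors := (PySem.List.pyRange 0 7 1).foldl (fun survivors j =>
    if !(([0, 6] : List Int).contains (PySem.Int.mod (j + startday) 7)) then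
      survivors.filter (fun i =>
        decide (PySem.List.pyGetD (PySem.List.pyGetD timelog i []) j 0 ≤
          PySem.List.pyGetD deadlines i 0))
    else survivors) (PySem.List.pyRange 0 (PySem.List.len schedule) 1)
  PySem.List.len survivors

-- ===== PRECONDITION & SPEC =====
-- Pre_ excludes exactly the inputs where Python A raises IndexError: A reads
-- timelog[i][j] for every i below len(schedule) and every j in range(7).
def Pre_solution (schedule : List Int) (timelog : List (List Int)) (startday : Int) : Prop :=
  schedule.length ≤ timelog.length ∧ ∀ row ∈ timelog.take schedule.length, 7 ≤ row.length
instance (schedule : List Int) (timelog : List (List Int)) (startday : Int) : Decidable (Pre_solution schedule timelog startday) := by unfold Pre_solution; infer_instance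

def pvWitness_solution : List Int × List (List Int) × Int :=
  ([900], [[905, 900, 910, 855, 800, 1200, 900]], 1)

def Spec_solution (schedule : List Int) (timelog : List (List Int)) (startday : Int) (out : Int) : Prop := out = solution_alt schedule timelog startday
instance (schedule : List Int) (timelog : List (List Int)) (startday : Int) (out : Int) : Decidable (Spec_solution schedule timelog startday out) := by unfold Spec_solution; infer_instance

-- ===== CLAIM (what is proved, stated in full; the proofs are below) =====
def Claim_equal_solution : Prop := ∀ (schedule : List Int) (timelog : List (List Int)) (startday : Int), Dom_solution schedule timelog startday → Pre_solution schedule timelog startday → Spec_solution schedule timelog startday (solution schedule timelog startday)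

-- ===== LEMMAS AND PROOFS =====

-- A's branchy check-time equals B's minutes round-trip
theorem pv_checktime_eq (t : Int) :
    (if PySem.Int.mod t 100 + 10 ≥ 60
      then (PySem.Int.floordiv t 100 + 1) * 100 + PySem.Int.mod (PySem.Int.mod t 100 + 10) 60
      else t + 10)
    = PySem.Int.floordiv (PySem.Int.floordiv t 100 * 60 + PySem.Int.mod t 100 + 10) 60 * 100
      + PySem.Int.mod (PySem.Int.floordiv t 100 * 60 + PySem.Int.mod t 100 + 10) 60 := by
  have e1 : ∀ a : Int, PySem.Int.floordiv a 100 = a / 100 :=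
    fun a => PySem.Int.floordiv_eq_ediv_of_pos (by norm_num)
  have e2 : ∀ a : Int, PySem.Int.mod a 100 = a % 100 :=
    fun a => PySem.Int.mod_eq_emod_of_pos (by norm_num)
  have e3 : ∀ a : Int, PySem.Int.floordiv a 60 = a / 60 :=
    fun a => PySem.Int.floordiv_eq_ediv_of_pos (by norm_num)
  have e4 : ∀ a : Int, PySem.Int.mod a 60 = a % 60 :=
    fun a => PySem.Int.mod_eq_emod_of_pos (by norm_num)
  simp only [e1, e2, e3, e4]
  split_ifs <;> omega

-- B's day loop: iterated weekday filtering over any day list is one filter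
-- by the conjunction of the passed weekday tests
theorem pv_fold_filter (wd : Int → Bool) (q : Int → Int → Bool) :
    ∀ (days : List Int) (s : List Int),
    days.foldl (fun s j => if wd j then s.filter (fun i => q i j) else s) s
      = s.filter (fun i => days.all (fun j => !wd j || q i j)) := by
  intro days
  induction days with
  | nil => intro s; simp
  | cons j rest ih =>
    intro s
    simp only [List.foldl_cons, List.all_cons]
    by_cases hj : wd j = true
    · rw [if_pos hj, ih, List.filter_filter]
      apply List.filter_congr
      intro i _
      simp [hj, Bool.and_comm]
    · rw [if_neg hj, ih]
      apply List.filter_congr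
      intro i _
      rw [Bool.eq_false_iff.mpr hj]
      rfl

-- any 7 consecutive days contain exactly 5 weekdays
theorem pv_five_weekdays (sd : Int) :
    ((PySem.List.pyRange 0 7 1).filter
      (fun j => !(([0, 6] : List Int).contains (PySem.Int.mod (j + sd) 7)))).length = 5 := by
  have hmod : ∀ j : Int, PySem.Int.mod (j + sd) 7 = PySem.Int.mod (j + PySem.Int.mod sd 7) 7 := by
    intro j
    rw [PySem.Int.mod_eq_emod_of_pos (by norm_num), PySem.Int.mod_eq_emod_of_pos (by norm_num),
        PySem.Int.mod_eq_emod_of_pos (by norm_num)]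
    omega
  simp only [hmod]
  have h0 : 0 ≤ PySem.Int.mod sd 7 := PySem.Int.mod_nonneg _ (by norm_num)
  have h7 : PySem.Int.mod sd 7 < 7 := PySem.Int.mod_lt _ (by norm_num)
  set r := PySem.Int.mod sd 7 with hr
  interval_cases r <;> decide

-- per employee: A's weekday count reaching 5 is exactly 'every weekday test passes'
theorem pv_inner_eq (sd : Int) (v : Int → Int) (c : Int) :
    ((PySem.List.pyRange 0 7 1).foldl (fun check j =>
        if ¬ (PySem.Int.mod (j + sd) 7 ∈ ([6, 0] : List Int)) ∧ v j ≤ c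
          then check + 1 else check) (0 : Int) = 5)
    ↔ ((PySem.List.pyRange 0 7 1).all
        (fun j => !(!(([0, 6] : List Int).contains (PySem.Int.mod (j + sd) 7)))
                  || decide (v j ≤ c)) = true) := by
  have hwd : ∀ m : Int, (decide (¬ (m ∈ ([6, 0] : List Int))))
      = !(([0, 6] : List Int).contains m) := by
    intro m
    by_cases h6 : m = 6 <;> by_cases h0 : m = 0 <;> simp [h6, h0]
  have hfun : (fun (check : Int) (j : Int) =>
        if ¬ (PySem.Int.mod (j + sd) 7 ∈ ([6, 0] : List Int)) ∧ v j ≤ c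
          then check + 1 else check)
      = (fun check j =>
        if ((decide (v j ≤ c)) && !(([0, 6] : List Int).contains (PySem.Int.mod (j + sd) 7))) = true
          then check + 1 else check) := by
    funext check j
    rw [← hwd]
    simp [and_comm]
  rw [hfun, PySem.List.foldl_count_if, ← List.countP_filter]
  have h5 := pv_five_weekdays sd
  have hle := List.countP_le_length
    (p := fun j => decide (v j ≤ c))
    (l := (PySem.List.pyRange 0 7 1).filter
      (fun j => !(([0, 6] : List Int).contains (PySem.Int.mod (j + sd) 7))))
  have hiff := List.countP_eq_length
    (p := fun j => decide (v j ≤ c))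
    (l := (PySem.List.pyRange 0 7 1).filter
      (fun j => !(([0, 6] : List Int).contains (PySem.Int.mod (j + sd) 7))))
  rw [List.all_eq_true]
  constructor
  · intro h j hj
    by_cases hw : (([0, 6] : List Int).contains (PySem.Int.mod (j + sd) 7)) = true
    · rw [hw]; rfl
    · have hwf := Bool.eq_false_iff.mpr hw
      have hv : decide (v j ≤ c) = true :=
        (hiff.mp (by omega)) j (List.mem_filter.mpr ⟨hj, by rw [hwf]; rfl⟩)
      rw [hwf, hv]; rfl
  · intro h
    have := hiff.mpr (by
      intro j hj
      rcases List.mem_filter.mp hj with ⟨hj1, hj2⟩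
      have hwf : (([0, 6] : List Int).contains (PySem.Int.mod (j + sd) 7)) = false := by
        cases hcc : (([0, 6] : List Int).contains (PySem.Int.mod (j + sd) 7))
        · rfl
        · rw [hcc] at hj2; exact absurd hj2 (by decide)
      have hbj := h j hj1
      rw [hwf] at hbj
      simpa using hbj)
    omega

-- ===== VERDICT (by name: the statement is the Claim_ definition above) =====
theorem solution_spec : Claim_equal_solution := by
  intro schedule timelog startday _ _
  unfold Spec_solution
  simp only [solution, solution_alt]
  rw [pv_fold_filter]
  rw [PySem.List.enumerate_eq_map_pyRange (d := 0)]
  -- A's fold is a countP over the index range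
  rw [PySem.List.foldl_ite_add_one]
  rw [List.countP_map]
  simp only [PySem.List.len_eq]
  rw [List.countP_eq_length_filter]
  simp only [zero_add]
  congr 2
  apply List.filter_congr
  intro i hi
  rcases (PySem.List.mem_pyRange_one).mp hi with ⟨hi0, hin⟩
  simp only [Function.comp_apply]
  rw [pv_checktime_eq]
  -- rewrite B's deadline lookup to the deadline of schedule[i]
  have hidx : PySem.List.pyGetD ((schedule.map (fun t =>
        PySem.Int.floordiv t 100 * 60 + PySem.Int.mod t 100 + 10)).map (fun m =>
        PySem.Int.floordiv m 60 * 100 + PySem.Int.mod m 60)) i 0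
      = (fun m => PySem.Int.floordiv m 60 * 100 + PySem.Int.mod m 60)
        ((fun t => PySem.Int.floordiv t 100 * 60 + PySem.Int.mod t 100 + 10)
          (PySem.List.pyGetD schedule i 0)) := by
    have hlen : i < (((schedule.map (fun t =>
        PySem.Int.floordiv t 100 * 60 + PySem.Int.mod t 100 + 10)).map (fun m =>
        PySem.Int.floordiv m 60 * 100 + PySem.Int.mod m 60)).length : Int) := by
      simpa using hin
    rw [PySem.List.pyGetD_eq_getElem _ _ hi0 hlen,
        PySem.List.pyGetD_eq_getElem _ _ hi0 (by simpa using hin)]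
    simp
  rw [hidx]
  rw [Bool.eq_iff_iff, decide_eq_true_iff]
  exact pv_inner_eq startday
    (fun j => PySem.List.pyGetD (PySem.List.pyGetD timelog i []) j 0) _
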